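-- pv_equiv track=rewrite | github.com/alxwen711/contestSubmissionArchive | codeforces/live contests/2025-2/1011/e.py | f
-- ===== SOURCE A (Python) =====
-- def f(n,ar,blist,x):
--     d = {}
--     for a in ar:
--         v = a % x
--         if d.get(v) == None:
--             d[v] = 0
--         d[v] += 1
--     for b in blist.keys():
--         if d.get(b) == None: return False
--         if d[b] != blist[b]: return False
--     return True
-- ===== SOURCE B (Python) =====
-- def f(n, ar, blist, x):
--     # Multiset comparison instead of key-by-key count checks: expand blist into
--     # the sorted list of expected residues (each key repeated its expected count)
--     # and compare with the sorted residues of ar restricted to expected keys.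
--     expected = sorted(b for b, v in blist.items() for _ in range(v))
--     got = sorted(a % x for a in ar if (a % x) in blist)
--     return all(v > 0 for v in blist.values()) and got == expected
-- ===== Notes on version B (the rewrite author's own statement) =====
-- stated objective: alternative
-- what changed: B replaces A's frequency-dict build plus key-by-key lookup check with a sorted-multiset comparison: it expands blist into the sorted list of expected residues and compares it with the sorted residues of ar restricted to the expected keys (plus an all-counts-positive guard).
import Mathlib
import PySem

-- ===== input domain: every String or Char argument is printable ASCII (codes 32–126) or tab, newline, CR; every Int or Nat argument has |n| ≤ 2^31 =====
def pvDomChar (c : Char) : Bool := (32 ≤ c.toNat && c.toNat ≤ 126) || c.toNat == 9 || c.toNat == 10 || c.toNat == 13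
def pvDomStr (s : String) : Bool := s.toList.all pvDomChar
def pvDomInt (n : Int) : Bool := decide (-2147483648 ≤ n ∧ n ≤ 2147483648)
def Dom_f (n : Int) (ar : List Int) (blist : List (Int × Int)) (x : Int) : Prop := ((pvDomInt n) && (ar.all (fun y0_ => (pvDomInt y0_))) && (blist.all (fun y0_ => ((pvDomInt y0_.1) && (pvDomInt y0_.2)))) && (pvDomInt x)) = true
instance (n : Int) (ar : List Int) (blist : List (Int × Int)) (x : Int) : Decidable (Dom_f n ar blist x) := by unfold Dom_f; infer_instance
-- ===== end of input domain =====

-- B replaces A's frequency-dict-and-lookup check with a sorted-multiset comparison (alternative algorithm, not claimed faster). Pre_ excludes x = 0 with non-empty ar (A raises ZeroDivisionError) and association lists with duplicate keys, which no Python dict produces.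


-- ===== PORT A =====
-- the second loop of A: for b in blist.keys(): …
def fCheck (d : PySem.Dict Int Int) (bd : PySem.Dict Int Int) : List Int → Bool
  | [] => true
  | b :: rest =>
    if (d.get? b).isNone then false
    else if d.getD b 0 ≠ bd.getD b 0 then false
    else fCheck d bd rest

-- the first loop of A: build the frequency dict of a % x
def fBuild (ar : List Int) (x : Int) : PySem.Dict Int Int :=
  ar.foldl (fun d a =>
    let v := PySem.Int.mod a x
    let d := if (d.get? v).isNone then d.insert v 0 else d
    d.insert v (d.getD v 0 + 1)) PySem.Dict.empty

def f (n : Int) (ar : List Int) (blist : List (Int × Int)) (x : Int) : Bool :=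
  fCheck (fBuild ar x) (PySem.Dict.mk blist) (blist.map (·.1))

-- ===== PORT B =====
-- expected = sorted(b for b, v in blist.items() for _ in range(v))
def fExpected (bd : PySem.Dict Int Int) : List Int :=
  PySem.List.sorted
    (bd.items.flatMap (fun p => (PySem.List.pyRange 0 p.2 1).map (fun _ => p.1)))
    (fun y => y) false

-- got = sorted(a % x for a in ar if (a % x) in blist)
def fGot (bd : PySem.Dict Int Int) (ar : List Int) (x : Int) : List Int :=
  PySem.List.sorted
    ((ar.filter (fun a => bd.contains (PySem.Int.mod a x))).map (fun a => PySem.Int.mod a x))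
    (fun y => y) false

def f_alt (n : Int) (ar : List Int) (blist : List (Int × Int)) (x : Int) : Bool :=
  ((PySem.Dict.mk blist).values.all (fun v => decide (0 < v)))
    && (fGot (PySem.Dict.mk blist) ar x == fExpected (PySem.Dict.mk blist))

-- ===== PRECONDITION & SPEC =====
-- A raises ZeroDivisionError when x = 0 and ar is non-empty; and blist is a Python dict,
-- so its association list never carries duplicate keys — Pre_ excludes exactly those inputs.
def Pre_f (n : Int) (ar : List Int) (blist : List (Int × Int)) (x : Int) : Prop :=
  (ar = [] ∨ x ≠ 0) ∧ (blist.map (·.1)).Nodup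
instance (n : Int) (ar : List Int) (blist : List (Int × Int)) (x : Int) : Decidable (Pre_f n ar blist x) := by unfold Pre_f; infer_instance
def pvWitness_f : Int × List Int × (List (Int × Int)) × Int := (3, [1, 2, 4], [(1, 2), (2, 1)], 3)

def Spec_f (n : Int) (ar : List Int) (blist : List (Int × Int)) (x : Int) (out : Bool) : Prop := out = f_alt n ar blist x
instance (n : Int) (ar : List Int) (blist : List (Int × Int)) (x : Int) (out : Bool) : Decidable (Spec_f n ar blist x out) := by unfold Spec_f; infer_instance

-- ===== CLAIM (what is proved, stated in full; the proofs are below) =====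
def Claim_equal_f : Prop := ∀ (n : Int) (ar : List Int) (blist : List (Int × Int)) (x : Int), Dom_f n ar blist x → Pre_f n ar blist x → Spec_f n ar blist x (f n ar blist x)

-- ===== LEMMAS AND PROOFS =====

-- A's counting step collapses to a plain counter-insert step
lemma fStep_eq (d : PySem.Dict Int Int) (v : Int) :
    (if (d.get? v).isNone then d.insert v 0 else d).insert v
      ((if (d.get? v).isNone then d.insert v 0 else d).getD v 0 + 1)
    = d.insert v (d.getD v 0 + 1) := by
  cases h : d.get? v with
  | none =>
      simp only [Option.isNone_none, if_pos]
      rw [PySem.Dict.getD_insert_self, PySem.Dict.insert_insert_self,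
        PySem.Dict.getD_of_get?_eq_none d 0 h]
  | some w => simp

-- A's dict, rewritten as the standard counter fold over the residues
lemma fDict_eq (ar : List Int) (x : Int) :
    fBuild ar x
    = (ar.map (fun a => PySem.Int.mod a x)).foldl
        (fun d v => d.insert v (d.getD v 0 + 1)) PySem.Dict.empty := by
  unfold fBuild
  rw [List.foldl_map]
  exact PySem.List.foldl_congr_mem ar _ _ _
    (fun acc a _ => fStep_eq acc (PySem.Int.mod a x))

-- A's check loop is a universally quantified pass/fail over the keys
lemma fCheck_eq_true_iff (d bd : PySem.Dict Int Int) (ks : List Int) :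
    fCheck d bd ks = true ↔ ∀ b ∈ ks, (d.get? b).isNone = false ∧ d.getD b 0 = bd.getD b 0 := by
  induction ks with
  | nil => simp [fCheck]
  | cons b rest ih =>
      rw [List.forall_mem_cons, ← ih]
      simp only [fCheck]
      by_cases h1 : (d.get? b).isNone
      · simp [h1]
      · have h1' : (d.get? b).isNone = false := by rwa [Bool.not_eq_true] at h1
        by_cases h2 : d.getD b 0 = bd.getD b 0
        · simp [h1', h2]
        · simp [h1', h2]

-- lookup in a duplicate-free association dict
lemma getD_mk_of_mem (blist : List (Int × Int)) (b v : Int)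
    (hnd : (blist.map (·.1)).Nodup) (hmem : (b, v) ∈ blist) :
    (PySem.Dict.mk blist).getD b 0 = v := by
  induction blist with
  | nil => cases hmem
  | cons p rest ih =>
      obtain ⟨k, w⟩ := p
      simp only [List.map_cons, List.nodup_cons] at hnd
      rcases List.mem_cons.mp hmem with h | hmem
      · rw [Prod.mk.injEq] at h
        obtain ⟨rfl, rfl⟩ := h
        show ((PySem.Dict.mk ((b, v) :: rest)).get? b).getD 0 = v
        rw [PySem.Dict.get?_mk_cons]; simp
      · have hne : ¬ k = b := by
          intro h
          exact hnd.1 (h ▸ List.mem_map_of_mem hmem)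
        show ((PySem.Dict.mk ((k, w) :: rest)).get? b).getD 0 = v
        rw [PySem.Dict.get?_mk_cons]
        simp only [beq_iff_eq, hne, if_false]
        exact ih hnd.2 hmem

-- count of a key b in the expansion of blist (each key repeated its value many times)
lemma count_expansion (blist : List (Int × Int)) (b : Int)
    (hnd : (blist.map (·.1)).Nodup) :
    (blist.flatMap (fun p => (PySem.List.pyRange 0 p.2 1).map (fun _ => p.1))).count b
    = if b ∈ blist.map (·.1) then ((PySem.Dict.mk blist).getD b 0).toNat else 0 := by
  induction blist with
  | nil => simp
  | cons p rest ih =>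
      obtain ⟨k, w⟩ := p
      simp only [List.map_cons, List.nodup_cons] at hnd
      have hrep : (PySem.List.pyRange 0 w 1).map (fun _ => k)
          = List.replicate w.toNat k := by
        apply List.eq_replicate_iff.mpr
        constructor
        · rw [List.length_map, PySem.List.length_pyRange_one]; simp
        · intro c hc
          rcases List.mem_map.mp hc with ⟨_, _, rfl⟩; rfl
      simp only [List.flatMap_cons, List.count_append, hrep, List.count_replicate]
      rw [ih hnd.2]
      by_cases hb : k = b
      · subst hb
        have hgd : (PySem.Dict.mk ((k, w) :: rest)).getD k 0 = w :=
          getD_mk_of_mem ((k, w) :: rest) k w (by simp [hnd.1, hnd.2]) (by simp)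
        simp [hnd.1, hgd]
      · have hget : (PySem.Dict.mk ((k, w) :: rest)).getD b 0
            = (PySem.Dict.mk rest).getD b 0 := by
          show ((PySem.Dict.mk ((k, w) :: rest)).get? b).getD 0 = _
          rw [PySem.Dict.get?_mk_cons]
          simp only [beq_iff_eq, hb, if_false]; rfl
        have hne : ¬ b = k := fun h => hb h.symm
        have hkb : (k == b) = false := by simp [hb]
        rw [hkb, if_neg (fun h => Bool.false_ne_true h), zero_add, hget, List.map_cons]
        have hmemiff : (b ∈ rest.map (fun x : Int × Int => x.1))
            ↔ (b ∈ k :: rest.map (fun x : Int × Int => x.1)) := by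
          constructor
          · exact fun h => List.mem_cons_of_mem _ h
          · intro h
            rcases List.mem_cons.mp h with h | h
            · exact absurd h hne
            · exact h
        exact if_congr hmemiff rfl rfl

-- count of a key in the residues restricted to the expected keys
lemma count_filter_mem (ms : List Int) (K : List Int) (b : Int) :
    (ms.filter (fun r => decide (r ∈ K))).count b
    = if b ∈ K then ms.count b else 0 := by
  by_cases hb : b ∈ K
  · rw [if_pos hb, List.count_filter (by simpa using hb)]
  · rw [if_neg hb, List.count_eq_zero]
    intro hmem
    have := List.of_mem_filter hmem
    simp at this
    exact hb this

-- residue count of A's frequency dict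
lemma fBuild_getD (ar : List Int) (x : Int) (b : Int) :
    (fBuild ar x).getD b 0 = ((ar.map (fun a => PySem.Int.mod a x)).count b : Int) := by
  rw [fDict_eq, PySem.Dict.getD_foldl_insert_add_one]
  simp [PySem.Dict.getD_empty]

lemma fBuild_get?_isNone (ar : List Int) (x : Int) (b : Int) :
    ((fBuild ar x).get? b).isNone = true ↔ b ∉ ar.map (fun a => PySem.Int.mod a x) := by
  rw [fDict_eq, Option.isNone_iff_eq_none, PySem.Dict.get?_eq_none_iff_not_mem_keys,
    PySem.Dict.keys_foldl_insert]
  simp [PySem.Dict.keys_empty, PySem.Set.update_nil_left, PySem.Set.mem_ofList]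

-- ===== VERDICT (by name: the statement is the Claim_ definition above) =====
theorem f_spec : Claim_equal_f := by
  intro n ar blist x _ hpre
  obtain ⟨-, hnd⟩ := hpre
  unfold Spec_f f f_alt fGot fExpected
  set ms := ar.map (fun a => PySem.Int.mod a x) with hms
  set K := blist.map (·.1) with hK
  set bd := PySem.Dict.mk blist with hbd
  rw [Bool.eq_iff_iff]
  -- A's side as a proposition
  have hA : fCheck (fBuild ar x) bd K = true
      ↔ ∀ b ∈ K, ms.count b ≠ 0 ∧ (ms.count b : Int) = bd.getD b 0 := by
    rw [fCheck_eq_true_iff]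
    apply forall_congr'; intro b; apply imp_congr_right; intro _
    rw [fBuild_getD]
    constructor
    · rintro ⟨h1, h2⟩
      refine ⟨?_, h2⟩
      intro hc0
      have hnm : b ∉ ms := List.count_eq_zero.mp hc0
      rw [← fBuild_get?_isNone ar x b] at hnm
      rw [hnm] at h1; cases h1
    · rintro ⟨h1, h2⟩
      refine ⟨?_, h2⟩
      cases hnone : ((fBuild ar x).get? b).isNone
      · rfl
      · exact absurd (List.count_eq_zero.mpr ((fBuild_get?_isNone ar x b).mp hnone)) h1
  rw [hA]
  -- B's side as a proposition
  have hcontains : ∀ r : Int, bd.contains r = decide (r ∈ K) := by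
    intro r
    rw [PySem.Dict.contains_eq_decide_mem_keys, hbd, PySem.Dict.keys_mk, hK]
  have hgot : (ar.filter (fun a => bd.contains (PySem.Int.mod a x))).map
        (fun a => PySem.Int.mod a x)
      = ms.filter (fun r => decide (r ∈ K)) := by
    rw [hms, List.filter_map]
    congr 1
    apply List.filter_congr
    intro a _
    simp only [Function.comp]; rw [hcontains]
  have hvals : bd.values = blist.map (·.2) := PySem.Dict.values_mk blist
  have hitems : bd.items = blist := rfl
  rw [hitems, hvals, hgot, Bool.and_eq_true, List.all_eq_true, beq_iff_eq,
    PySem.List.sorted_id_eq_sorted_id_iff_perm, List.perm_iff_count]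
  -- the two characterisations agree
  constructor
  · intro h
    constructor
    · intro v hv
      rcases List.mem_map.mp hv with ⟨p, hp, rfl⟩
      have hk : p.1 ∈ K := hK ▸ List.mem_map_of_mem hp
      have hgd : bd.getD p.1 0 = p.2 := getD_mk_of_mem blist p.1 p.2 hnd hp
      rcases h p.1 hk with ⟨hne, heq⟩
      rw [hgd] at heq
      simp only [decide_eq_true_eq]
      omega
    · intro b
      rw [count_filter_mem, count_expansion blist b hnd, ← hK, ← hbd]
      by_cases hbK : b ∈ K
      · rcases h b hbK with ⟨-, heq⟩
        simp only [hbK, if_true]; omega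
      · simp [hbK]
  · rintro ⟨hpos, hcnt⟩ b hbK
    rcases List.mem_map.mp (hK ▸ hbK) with ⟨p, hp, rfl⟩
    have hgd : bd.getD p.1 0 = p.2 := getD_mk_of_mem blist p.1 p.2 hnd hp
    have hv : 0 < p.2 := by
      have := hpos p.2 (List.mem_map_of_mem hp)
      simpa using this
    have hc := hcnt p.1
    rw [count_filter_mem, count_expansion blist p.1 hnd, ← hK, ← hbd, hgd,
      if_pos hbK, if_pos hbK] at hc
    rw [hgd]
    omega
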